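-- pv_equiv track=rewrite | github.com/espeon011/opt_note | src/opt_note/scsp/model/didp_scs3/__init__.py | boundtable_scs3
-- ===== SOURCE A (Python) =====
-- def boundtable_scs3(s1: str, s2: str, s3: str) -> list[list[list[int]]]:
--     len1, len2, len3 = len(s1), len(s2), len(s3)
--
--     # dp[i1][i2][i3]: s1[i1..] と s2[i2..] と s3[i3..] の SCS 長さ
--     dp = [
--         [[len1 + len2 + len3 + 1 for _ in range(len3 + 1)] for _ in range(len2 + 1)]
--         for _ in range(len1 + 1)
--     ]
--
--     for i1 in range(len1 + 1):
--         dp[i1][len2][len3] = len1 - i1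
--     for i2 in range(len2 + 1):
--         dp[len1][i2][len3] = len2 - i2
--     for i3 in range(len3 + 1):
--         dp[len1][len2][i3] = len3 - i3
--
--     for i1 in range(len1, -1, -1):
--         for i2 in range(len2, -1, -1):
--             for i3 in range(len3, -1, -1):
--                 if [i1 == len1, i2 == len2, i3 == len3].count(True) >= 2:
--                     continue
--
--                 front_chars = ""
--                 if i1 < len1:
--                     front_chars += s1[i1]
--                 if i2 < len2:
--                     front_chars += s2[i2]
--                 if i3 < len3:
--                     front_chars += s3[i3]
--                 front_chars = set(front_chars)
--
--                 pretransversals = [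
--                     (
--                         i1 + 1 if i1 < len1 and s1[i1] == c else i1,
--                         i2 + 1 if i2 < len2 and s2[i2] == c else i2,
--                         i3 + 1 if i3 < len3 and s3[i3] == c else i3,
--                     )
--                     for c in front_chars
--                 ]
--                 min_i1, min_i2, min_i3 = pretransversals[0]
--                 min_length = dp[min_i1][min_i2][min_i3]
--                 for pre_i1, pre_i2, pre_i3 in pretransversals:
--                     if dp[pre_i1][pre_i2][pre_i3] < min_length:
--                         min_i1 = pre_i1
--                         min_i2 = pre_i2
--                         min_i3 = pre_i3
--                         min_length = dp[pre_i1][pre_i2][pre_i3]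
--
--                 dp[i1][i2][i3] = min_length + 1
--
--     return dp
-- ===== SOURCE B (Python) =====
-- def boundtable_scs3(s1: str, s2: str, s3: str) -> list[list[list[int]]]:
--     n1, n2, n3 = len(s1), len(s2), len(s3)
--     memo = {}
--
--     def step(i1, i2, i3, c):
--         return (
--             i1 + 1 if i1 < n1 and s1[i1] == c else i1,
--             i2 + 1 if i2 < n2 and s2[i2] == c else i2,
--             i3 + 1 if i3 < n3 and s3[i3] == c else i3,
--         )
--
--     def children(i1, i2, i3):
--         kids = []
--         if i1 < n1:
--             kids.append(step(i1, i2, i3, s1[i1]))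
--         if i2 < n2:
--             kids.append(step(i1, i2, i3, s2[i2]))
--         if i3 < n3:
--             kids.append(step(i1, i2, i3, s3[i3]))
--         return kids
--
--     def solve(i1, i2, i3):
--         # memoized top-down DP driven by an explicit work stack (no recursion limit)
--         stack = [(i1, i2, i3)]
--         while stack:
--             t = stack[-1]
--             if t in memo:
--                 stack.pop()
--                 continue
--             a, b, c = t
--             if (a == n1) + (b == n2) + (c == n3) >= 2:
--                 memo[t] = (n1 - a) + (n2 - b) + (n3 - c)
--                 stack.pop()
--                 continue
--             kids = children(a, b, c)
--             missing = [k for k in kids if k not in memo]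
--             if missing:
--                 stack.extend(missing)
--             else:
--                 memo[t] = 1 + min(memo[k] for k in kids)
--                 stack.pop()
--         return memo[(i1, i2, i3)]
--
--     return [
--         [[solve(i1, i2, i3) for i3 in range(n3 + 1)] for i2 in range(n2 + 1)]
--         for i1 in range(n1 + 1)
--     ]
-- ===== Notes on version B (the rewrite author's own statement) =====
-- stated objective: alternative
-- what changed: A fills a mutable 3-D list bottom-up with three boundary pre-passes and a reverse triple loop doing an index-tracked min over the distinct-front-char set; B is a memoized top-down DP: solve(i1,i2,i3) evaluates cells on demand with an explicit work stack into a dict memo, taking per-string advance candidates (no char set, no boundary passes), and the driver queries every cell.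
import Mathlib
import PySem

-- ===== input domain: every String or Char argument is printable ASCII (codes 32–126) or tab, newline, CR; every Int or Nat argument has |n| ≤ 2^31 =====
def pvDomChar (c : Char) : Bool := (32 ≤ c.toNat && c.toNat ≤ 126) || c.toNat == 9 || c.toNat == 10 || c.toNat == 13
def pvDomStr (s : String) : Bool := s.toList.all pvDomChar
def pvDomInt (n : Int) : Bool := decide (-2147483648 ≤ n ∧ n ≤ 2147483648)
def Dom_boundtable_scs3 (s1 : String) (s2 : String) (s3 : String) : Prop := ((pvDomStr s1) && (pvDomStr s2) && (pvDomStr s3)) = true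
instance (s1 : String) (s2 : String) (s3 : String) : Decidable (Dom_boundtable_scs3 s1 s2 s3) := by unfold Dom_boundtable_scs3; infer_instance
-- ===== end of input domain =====

-- B replaces A's bottom-up mutable-3D-list fill by a memoized top-down DP: an explicit work
-- stack evaluates cells on demand into a dict memo (objective: alternative, same asymptotic cost).

-- ===== PORT A =====
-- helpers shared by the two ports (both Pythons contain these same subexpressions):
-- dp[i][j][k] read/write on the nested list; indices produced by the loops are always in range.
def pvGet3 (dp : List (List (List Int))) (i j k : Nat) : Int :=
  (((dp.getD i []).getD j []).getD k 0)
def pvSet3 (dp : List (List (List Int))) (i j k : Nat) (v : Int) : List (List (List Int)) :=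
  dp.set i ((dp.getD i []).set j (((dp.getD i []).getD j []).set k v))
-- '(i1+1 if i1 < len1 and s1[i1] == c else i1, …)' (s[i] guarded by i < len, so getD is exact)
def pvStep (l1 l2 l3 : List Char) (i1 i2 i3 : Nat) (c : Char) : Nat × Nat × Nat :=
  ((if i1 < l1.length ∧ l1.getD i1 ' ' = c then i1 + 1 else i1),
   (if i2 < l2.length ∧ l2.getD i2 ' ' = c then i2 + 1 else i2),
   (if i3 < l3.length ∧ l3.getD i3 ' ' = c then i3 + 1 else i3))
-- the ≤3 front characters of the non-exhausted strings, in string order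
def pvFrontList (l1 l2 l3 : List Char) (i1 i2 i3 : Nat) : List Char :=
  (if i1 < l1.length then [l1.getD i1 ' '] else []) ++
  (if i2 < l2.length then [l2.getD i2 ' '] else []) ++
  (if i3 < l3.length then [l3.getD i3 ' '] else [])
-- A's 'front_chars = set(front_chars)' (deduplicated, first occurrences kept)
def pvFronts (l1 l2 l3 : List Char) (i1 i2 i3 : Nat) : List Char :=
  PySem.Set.ofList (pvFrontList l1 l2 l3 i1 i2 i3)
-- '[i1 == len1, i2 == len2, i3 == len3].count(True) >= 2'
def pvTwoDone (n1 n2 n3 i1 i2 i3 : Nat) : Bool :=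
  2 ≤ ([decide (i1 = n1), decide (i2 = n2), decide (i3 = n3)].count true)

-- body of A's innermost loop
def pvBodyA (l1 l2 l3 : List Char) (dp : List (List (List Int))) (i1 i2 i3 : Nat) :
    List (List (List Int)) :=
  if pvTwoDone l1.length l2.length l3.length i1 i2 i3 then dp
  else
    let pres := (pvFronts l1 l2 l3 i1 i2 i3).map (pvStep l1 l2 l3 i1 i2 i3)
    match pres with
    | [] => dp   -- unreachable: at least two strings are non-exhausted here, so pres ≠ []
    | p0 :: _ =>
      let st := pres.foldl
        (fun (st : (Nat × Nat × Nat) × Int) p =>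
          if pvGet3 dp p.1 p.2.1 p.2.2 < st.2 then (p, pvGet3 dp p.1 p.2.1 p.2.2) else st)
        (p0, pvGet3 dp p0.1 p0.2.1 p0.2.2)
      pvSet3 dp i1 i2 i3 (st.2 + 1)

-- loop indices are the Nats 0..len (range(len+1) resp. range(len,-1,-1) reversed), so Nat counters are exact
def boundtable_scs3 (s1 : String) (s2 : String) (s3 : String) : List (List (List Int)) :=
  let l1 := s1.toList; let l2 := s2.toList; let l3 := s3.toList
  let n1 := l1.length; let n2 := l2.length; let n3 := l3.length
  let dp0 := List.replicate (n1+1) (List.replicate (n2+1) (List.replicate (n3+1) ((n1+n2+n3+1 : Nat) : Int)))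
  let dp1 := (List.range (n1+1)).foldl (fun dp i1 => pvSet3 dp i1 n2 n3 ((n1 : Int) - i1)) dp0
  let dp2 := (List.range (n2+1)).foldl (fun dp i2 => pvSet3 dp n1 i2 n3 ((n2 : Int) - i2)) dp1
  let dp3 := (List.range (n3+1)).foldl (fun dp i3 => pvSet3 dp n1 n2 i3 ((n3 : Int) - i3)) dp2
  ((List.range (n1+1)).reverse).foldl (fun dp i1 =>
    ((List.range (n2+1)).reverse).foldl (fun dp i2 =>
      ((List.range (n3+1)).reverse).foldl (fun dp i3 =>
        pvBodyA l1 l2 l3 dp i1 i2 i3) dp) dp) dp3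

-- ===== PORT B =====
-- number of characters still to place at cell q, and being inside the index box
def pvDsum (n1 n2 n3 : Nat) (q : Nat × Nat × Nat) : Nat :=
  (n1 - q.1) + (n2 - q.2.1) + (n3 - q.2.2)
def pvInb (n1 n2 n3 : Nat) (q : Nat × Nat × Nat) : Prop :=
  q.1 ≤ n1 ∧ q.2.1 ≤ n2 ∧ q.2.2 ≤ n3

-- B's 'children': one advance candidate per non-exhausted string (duplicates kept)
def pvKids (l1 l2 l3 : List Char) (i1 i2 i3 : Nat) : List (Nat × Nat × Nat) :=
  (pvFrontList l1 l2 l3 i1 i2 i3).map (pvStep l1 l2 l3 i1 i2 i3)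

-- ---- facts the stack loop itself needs (termination / stack-in-box), cited by pvLoop ----
lemma pvFrontList_mem (l1 l2 l3 : List Char) (i1 i2 i3 : Nat) (c : Char)
    (hc : c ∈ pvFrontList l1 l2 l3 i1 i2 i3) :
    (i1 < l1.length ∧ l1.getD i1 ' ' = c) ∨ (i2 < l2.length ∧ l2.getD i2 ' ' = c) ∨
      (i3 < l3.length ∧ l3.getD i3 ' ' = c) := by
  unfold pvFrontList at hc
  simp only [List.mem_append] at hc
  rcases hc with (h | h) | h
  · split_ifs at h with hh
    · simp only [List.mem_singleton] at h; exact Or.inl ⟨hh, h.symm⟩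
    · simp at h
  · split_ifs at h with hh
    · simp only [List.mem_singleton] at h; exact Or.inr (Or.inl ⟨hh, h.symm⟩)
    · simp at h
  · split_ifs at h with hh
    · simp only [List.mem_singleton] at h; exact Or.inr (Or.inr ⟨hh, h.symm⟩)
    · simp at h

lemma pvStep_dsum_lt_of (l1 l2 l3 : List Char) (i1 i2 i3 : Nat) (c : Char)
    (hm : (i1 < l1.length ∧ l1.getD i1 ' ' = c) ∨ (i2 < l2.length ∧ l2.getD i2 ' ' = c) ∨
      (i3 < l3.length ∧ l3.getD i3 ' ' = c)) :
    pvDsum l1.length l2.length l3.length (pvStep l1 l2 l3 i1 i2 i3 c) <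
      pvDsum l1.length l2.length l3.length (i1, i2, i3) := by
  have k1 : l1.length - (if i1 < l1.length ∧ l1.getD i1 ' ' = c then i1 + 1 else i1) ≤
      l1.length - i1 := by
    split_ifs
    · exact Nat.sub_le_sub_left (Nat.le_succ i1) l1.length
    · exact Nat.le_refl _
  have k2 : l2.length - (if i2 < l2.length ∧ l2.getD i2 ' ' = c then i2 + 1 else i2) ≤
      l2.length - i2 := by
    split_ifs
    · exact Nat.sub_le_sub_left (Nat.le_succ i2) l2.length
    · exact Nat.le_refl _
  have k3 : l3.length - (if i3 < l3.length ∧ l3.getD i3 ' ' = c then i3 + 1 else i3) ≤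
      l3.length - i3 := by
    split_ifs
    · exact Nat.sub_le_sub_left (Nat.le_succ i3) l3.length
    · exact Nat.le_refl _
  simp only [pvStep, pvDsum]
  rcases hm with h | h | h
  · refine Nat.add_lt_add_of_lt_of_le (Nat.add_lt_add_of_lt_of_le ?_ k2) k3
    rw [if_pos h]
    exact Nat.sub_succ_lt_self _ _ h.1
  · refine Nat.add_lt_add_of_lt_of_le (Nat.add_lt_add_of_le_of_lt k1 ?_) k3
    rw [if_pos h]
    exact Nat.sub_succ_lt_self _ _ h.1
  · refine Nat.add_lt_add_of_le_of_lt (Nat.add_le_add k1 k2) ?_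
    rw [if_pos h]
    exact Nat.sub_succ_lt_self _ _ h.1

lemma pvKids_dsum_lt (l1 l2 l3 : List Char) (i1 i2 i3 : Nat) (k : Nat × Nat × Nat)
    (hk : k ∈ pvKids l1 l2 l3 i1 i2 i3) :
    pvDsum l1.length l2.length l3.length k < pvDsum l1.length l2.length l3.length (i1, i2, i3) := by
  unfold pvKids at hk
  rw [List.mem_map] at hk
  obtain ⟨c, hc, rfl⟩ := hk
  exact pvStep_dsum_lt_of l1 l2 l3 i1 i2 i3 c (pvFrontList_mem l1 l2 l3 i1 i2 i3 c hc)

lemma pvStep_inb (l1 l2 l3 : List Char) (i1 i2 i3 : Nat) (c : Char)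
    (hb : pvInb l1.length l2.length l3.length (i1, i2, i3)) :
    pvInb l1.length l2.length l3.length (pvStep l1 l2 l3 i1 i2 i3 c) := by
  obtain ⟨h1, h2, h3⟩ := hb
  unfold pvStep pvInb
  refine ⟨?_, ?_, ?_⟩ <;> dsimp only
  · split_ifs with h
    · exact h.1
    · exact h1
  · split_ifs with h
    · exact h.1
    · exact h2
  · split_ifs with h
    · exact h.1
    · exact h3

lemma pvKids_inb (l1 l2 l3 : List Char) (i1 i2 i3 : Nat) (k : Nat × Nat × Nat)
    (hb : pvInb l1.length l2.length l3.length (i1, i2, i3))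
    (hk : k ∈ pvKids l1 l2 l3 i1 i2 i3) :
    pvInb l1.length l2.length l3.length k := by
  unfold pvKids at hk
  rw [List.mem_map] at hk
  obtain ⟨c, _, rfl⟩ := hk
  exact pvStep_inb l1 l2 l3 i1 i2 i3 c hb

-- termination measure pieces for the work-stack loop
def pvAllBox (n1 n2 n3 : Nat) : List (Nat × Nat × Nat) :=
  (List.range (n1+1)).flatMap (fun a => (List.range (n2+1)).flatMap (fun b =>
    (List.range (n3+1)).map (fun c => (a, b, c))))
def pvMissCount (n1 n2 n3 : Nat) (m : PySem.Dict (Nat × Nat × Nat) Int) : Nat :=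
  ((pvAllBox n1 n2 n3).filter (fun q => (m.get? q).isNone)).length
def pvSomeCount (m : PySem.Dict (Nat × Nat × Nat) Int) (st : List (Nat × Nat × Nat)) : Nat :=
  (st.filter (fun t => (m.get? t).isSome)).length
def pvTopD (n1 n2 n3 : Nat) (st : List (Nat × Nat × Nat)) : Nat :=
  match st with
  | [] => 0
  | t :: _ => pvDsum n1 n2 n3 t

lemma pvMem_allBox (n1 n2 n3 : Nat) (q : Nat × Nat × Nat)
    (h : pvInb n1 n2 n3 q) : q ∈ pvAllBox n1 n2 n3 := by
  obtain ⟨a, b, c⟩ := q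
  have h1 : a ≤ n1 := h.1
  have h2 : b ≤ n2 := h.2.1
  have h3 : c ≤ n3 := h.2.2
  unfold pvAllBox
  simp only [List.mem_flatMap, List.mem_map, List.mem_range]
  exact ⟨a, by omega, b, by omega, c, by omega, rfl⟩

lemma pvFilter_length_le {α : Type} (l : List α) (p q : α → Bool)
    (himp : ∀ x ∈ l, q x = true → p x = true) :
    (l.filter q).length ≤ (l.filter p).length := by
  induction l with
  | nil => simp
  | cons a l ih =>
    have ih' := ih (fun x hx => himp x (List.mem_cons_of_mem a hx))
    simp only [List.filter_cons]
    by_cases hq : q a = true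
    · rw [if_pos hq, if_pos (himp a List.mem_cons_self hq)]
      simpa using ih'
    · rw [if_neg hq]
      by_cases hp : p a = true
      · rw [if_pos hp]
        simp only [List.length_cons]
        omega
      · rw [if_neg hp]
        exact ih'

lemma pvFilter_length_lt {α : Type} (l : List α) (p q : α → Bool)
    (himp : ∀ x ∈ l, q x = true → p x = true) (t : α)
    (ht : t ∈ l) (hp : p t = true) (hq : q t = false) :
    (l.filter q).length < (l.filter p).length := by
  induction l with
  | nil => simp at ht
  | cons a l ih =>
    have hle := pvFilter_length_le l p q (fun x hx => himp x (List.mem_cons_of_mem a hx))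
    simp only [List.filter_cons]
    rcases List.mem_cons.1 ht with rfl | hmem
    · rw [if_neg (by simp [hq]), if_pos hp]
      simp only [List.length_cons]
      omega
    · have ih' := ih (fun x hx => himp x (List.mem_cons_of_mem a hx)) hmem
      by_cases hqa : q a = true
      · rw [if_pos hqa, if_pos (himp a List.mem_cons_self hqa)]
        simpa using ih'
      · rw [if_neg hqa]
        by_cases hpa : p a = true
        · rw [if_pos hpa]
          exact Nat.lt_succ_of_lt ih'
        · rw [if_neg hpa]
          exact ih'

lemma pvMissCount_insert_lt (n1 n2 n3 : Nat) (m : PySem.Dict (Nat × Nat × Nat) Int)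
    (t : Nat × Nat × Nat) (v : Int) (ht : pvInb n1 n2 n3 t) (hn : m.get? t = none) :
    pvMissCount n1 n2 n3 (m.insert t v) < pvMissCount n1 n2 n3 m := by
  unfold pvMissCount
  refine pvFilter_length_lt _ _ _ ?_ t (pvMem_allBox n1 n2 n3 t ht) ?_ ?_
  · intro x _ hx
    rw [PySem.Dict.get?_insert] at hx
    by_cases hxt : x = t
    · rw [if_pos hxt] at hx
      simp at hx
    · rw [if_neg hxt] at hx
      exact hx
  · simp [hn]
  · simp [PySem.Dict.get?_insert_self]

lemma pvSomeCount_tail_lt (m : PySem.Dict (Nat × Nat × Nat) Int)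
    (t : Nat × Nat × Nat) (rest : List (Nat × Nat × Nat)) (h : (m.get? t).isSome = true) :
    pvSomeCount m rest < pvSomeCount m (t :: rest) := by
  unfold pvSomeCount
  rw [List.filter_cons, if_pos (by simpa using h)]
  simp

lemma pvSomeCount_push (m : PySem.Dict (Nat × Nat × Nat) Int)
    (miss : List (Nat × Nat × Nat)) (rest : List (Nat × Nat × Nat))
    (hm : ∀ k ∈ miss, (m.get? k).isNone = true) :
    pvSomeCount m (miss.reverse ++ rest) = pvSomeCount m rest := by
  unfold pvSomeCount
  rw [List.filter_append]
  have : miss.reverse.filter (fun t => (m.get? t).isSome) = [] := by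
    rw [List.filter_eq_nil_iff]
    intro k hk
    have := hm k (List.mem_reverse.1 hk)
    simp_all [Option.isNone_iff_eq_none]
  rw [this, List.nil_append]

lemma pvTopD_append_lt (n1 n2 n3 : Nat) (miss rest : List (Nat × Nat × Nat)) (D : Nat)
    (hne : miss ≠ []) (hlt : ∀ k ∈ miss, pvDsum n1 n2 n3 k < D) :
    pvTopD n1 n2 n3 (miss.reverse ++ rest) < D := by
  obtain ⟨a, l', ha⟩ := List.exists_cons_of_ne_nil (by simpa using hne :
    miss.reverse ≠ [])
  rw [ha, List.cons_append]
  have haMem : a ∈ miss := List.mem_reverse.1 (ha ▸ List.mem_cons_self)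
  exact hlt a haMem

lemma pvInbTail (l1 l2 l3 : List Char) (t : Nat × Nat × Nat) (rest : List (Nat × Nat × Nat))
    (hst : ∀ u ∈ t :: rest, pvInb l1.length l2.length l3.length u) :
    ∀ u ∈ rest, pvInb l1.length l2.length l3.length u :=
  fun u hu => hst u (List.mem_cons_of_mem t hu)

lemma pvInbPush (l1 l2 l3 : List Char) (t : Nat × Nat × Nat) (rest : List (Nat × Nat × Nat))
    (memo : PySem.Dict (Nat × Nat × Nat) Int)
    (hst : ∀ u ∈ t :: rest, pvInb l1.length l2.length l3.length u) :
    ∀ u ∈ ((pvKids l1 l2 l3 t.1 t.2.1 t.2.2).filter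
        (fun k => (memo.get? k).isNone)).reverse ++ t :: rest,
      pvInb l1.length l2.length l3.length u := by
  intro u hu
  rcases List.mem_append.1 hu with hl | hr
  · exact pvKids_inb l1 l2 l3 t.1 t.2.1 t.2.2 u (hst t List.mem_cons_self)
      (List.mem_filter.1 (List.mem_reverse.1 hl)).1
  · exact hst u hr

-- the three decrease shapes of the loop's lexicographic measure
lemma pvLexFst {a1 a2 b1 b2 c1 c2 : Nat} (h : a2 < a1) :
    Prod.Lex (· < ·) (Prod.Lex (· < ·) (· < ·)) (a2, b2, c2) (a1, b1, c1) :=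
  Prod.Lex.left _ _ h

lemma pvLexSnd {a b1 b2 c1 c2 : Nat} (h : b2 < b1) :
    Prod.Lex (· < ·) (Prod.Lex (· < ·) (· < ·)) (a, b2, c2) (a, b1, c1) :=
  Prod.Lex.right _ (Prod.Lex.left _ _ h)

lemma pvLexThd {a b1 b2 c1 c2 : Nat} (hb : b2 = b1) (h : c2 < c1) :
    Prod.Lex (· < ·) (Prod.Lex (· < ·) (· < ·)) (a, b2, c2) (a, b1, c1) := by
  subst hb
  exact Prod.Lex.right _ (Prod.Lex.right _ h)

-- B's 'solve': the while loop over the explicit work stack, memoizing into the dict.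
-- (hst carries 'every stacked cell is inside the index box', true at every call site;
--  the .getD 0 on the min is a totalization guard: the child list is provably non-empty there)
def pvLoop (l1 l2 l3 : List Char) (stack : List (Nat × Nat × Nat))
    (memo : PySem.Dict (Nat × Nat × Nat) Int)
    (hst : ∀ t ∈ stack, pvInb l1.length l2.length l3.length t) :
    PySem.Dict (Nat × Nat × Nat) Int :=
  match stack with
  | [] => memo
  | t :: rest =>
    if h1 : (memo.get? t).isSome then
      pvLoop l1 l2 l3 rest memo (pvInbTail l1 l2 l3 t rest hst)
    else if h2 : pvTwoDone l1.length l2.length l3.length t.1 t.2.1 t.2.2 then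
      pvLoop l1 l2 l3 rest
        (memo.insert t (((l1.length - t.1) + (l2.length - t.2.1) + (l3.length - t.2.2) : Nat) : Int))
        (pvInbTail l1 l2 l3 t rest hst)
    else if h3 : ((pvKids l1 l2 l3 t.1 t.2.1 t.2.2).filter
        (fun k => (memo.get? k).isNone)) = [] then
      pvLoop l1 l2 l3 rest
        (memo.insert t (1 + (PySem.List.min?
          ((pvKids l1 l2 l3 t.1 t.2.1 t.2.2).map (fun k => (memo.get? k).getD 0))
          (fun x => x)).getD 0))
        (pvInbTail l1 l2 l3 t rest hst)
    else
      pvLoop l1 l2 l3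
        (((pvKids l1 l2 l3 t.1 t.2.1 t.2.2).filter (fun k => (memo.get? k).isNone)).reverse
          ++ t :: rest) memo
        (pvInbPush l1 l2 l3 t rest memo hst)
termination_by
  (pvMissCount l1.length l2.length l3.length memo, pvSomeCount memo stack,
   pvTopD l1.length l2.length l3.length stack)
decreasing_by
  · exact pvLexSnd (pvSomeCount_tail_lt memo t rest h1)
  · exact pvLexFst (pvMissCount_insert_lt _ _ _ memo t _ (hst t List.mem_cons_self)
      (Option.not_isSome_iff_eq_none.mp h1))
  · exact pvLexFst (pvMissCount_insert_lt _ _ _ memo t _ (hst t List.mem_cons_self)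
      (Option.not_isSome_iff_eq_none.mp h1))
  · exact pvLexThd (pvSomeCount_push memo _ (t :: rest) (fun k hk => (List.mem_filter.1 hk).2))
      (pvTopD_append_lt _ _ _ _ (t :: rest) _ h3
        (fun k hk => pvKids_dsum_lt l1 l2 l3 t.1 t.2.1 t.2.2 k (List.mem_filter.1 hk).1))

-- B's driver: thread the memo through the three comprehensions, querying every cell
-- (folds run over '.attach' only to carry the range-membership fact pvLoop's box argument needs)
def boundtable_scs3_alt (s1 : String) (s2 : String) (s3 : String) : List (List (List Int)) :=
  let l1 := s1.toList
  let l2 := s2.toList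
  let l3 := s3.toList
  let n1 := l1.length
  let n2 := l2.length
  let n3 := l3.length
  ((List.range (n1+1)).attach.foldl
    (fun (st : PySem.Dict (Nat × Nat × Nat) Int × List (List (List Int))) i1 =>
      let r2 := (List.range (n2+1)).attach.foldl
        (fun (st2 : PySem.Dict (Nat × Nat × Nat) Int × List (List Int)) (i2 : {x // x ∈ List.range (s2.toList.length + 1)}) =>
          let r3 := (List.range (n3+1)).attach.foldl
            (fun (st3 : PySem.Dict (Nat × Nat × Nat) Int × List Int) (i3 : {x // x ∈ List.range (s3.toList.length + 1)}) =>
              let m' := pvLoop l1 l2 l3 [(i1.1, i2.1, i3.1)] st3.1 (by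
                intro u hu
                rw [List.mem_singleton] at hu
                subst hu
                exact ⟨Nat.lt_succ_iff.mp (List.mem_range.1 i1.2),
                       Nat.lt_succ_iff.mp (List.mem_range.1 i2.2),
                       Nat.lt_succ_iff.mp (List.mem_range.1 i3.2)⟩)
              -- 'return memo[(i1, i2, i3)]': the key is always present (proved below), so getD is exact
              (m', st3.2 ++ [(m'.get? (i1.1, i2.1, i3.1)).getD 0]))
            (st2.1, ([] : List Int))
          (r3.1, st2.2 ++ [r3.2]))
        (st.1, ([] : List (List Int)))
      (r2.1, st.2 ++ [r2.2]))
    ((PySem.Dict.empty : PySem.Dict (Nat × Nat × Nat) Int), ([] : List (List (List Int))))).2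

-- ===== PRECONDITION & SPEC =====
def Spec_boundtable_scs3 (s1 : String) (s2 : String) (s3 : String) (out : List (List (List Int))) : Prop := out = boundtable_scs3_alt s1 s2 s3
instance (s1 : String) (s2 : String) (s3 : String) (out : List (List (List Int))) : Decidable (Spec_boundtable_scs3 s1 s2 s3 out) := by unfold Spec_boundtable_scs3; infer_instance

-- ===== CLAIM (what is proved, stated in full; the proofs are below) =====
def Claim_equal_boundtable_scs3 : Prop := ∀ (s1 : String) (s2 : String) (s3 : String), Dom_boundtable_scs3 s1 s2 s3 → Spec_boundtable_scs3 s1 s2 s3 (boundtable_scs3 s1 s2 s3)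

-- ===== LEMMAS AND PROOFS =====

-- minimum of a non-empty list, as both Pythons' min computations produce it
def pvMinD : List Int → Int
  | [] => 0
  | x :: xs => xs.foldl min x

lemma pvFronts_mem (l1 l2 l3 : List Char) (i1 i2 i3 : Nat) (c : Char)
    (hc : c ∈ pvFronts l1 l2 l3 i1 i2 i3) :
    (i1 < l1.length ∧ l1.getD i1 ' ' = c) ∨ (i2 < l2.length ∧ l2.getD i2 ' ' = c) ∨
      (i3 < l3.length ∧ l3.getD i3 ' ' = c) := by
  unfold pvFronts at hc
  rw [PySem.Set.mem_ofList] at hc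
  exact pvFrontList_mem l1 l2 l3 i1 i2 i3 c hc

lemma pvStep_dsum_lt (l1 l2 l3 : List Char) (i1 i2 i3 : Nat) (c : Char)
    (hc : c ∈ pvFronts l1 l2 l3 i1 i2 i3) :
    pvDsum l1.length l2.length l3.length (pvStep l1 l2 l3 i1 i2 i3 c) <
      pvDsum l1.length l2.length l3.length (i1, i2, i3) :=
  pvStep_dsum_lt_of l1 l2 l3 i1 i2 i3 c (pvFronts_mem l1 l2 l3 i1 i2 i3 c hc)

-- the common mathematical value: SCS length of the three suffixes
def pvScs (l1 l2 l3 : List Char) (i1 i2 i3 : Nat) : Int :=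
  if pvTwoDone l1.length l2.length l3.length i1 i2 i3 then
    (((l1.length - i1) + (l2.length - i2) + (l3.length - i3) : Nat) : Int)
  else
    1 + pvMinD ((pvFronts l1 l2 l3 i1 i2 i3).attach.map
      (fun c =>
        let p := pvStep l1 l2 l3 i1 i2 i3 c.1
        pvScs l1 l2 l3 p.1 p.2.1 p.2.2))
termination_by pvDsum l1.length l2.length l3.length (i1, i2, i3)
decreasing_by
  exact pvStep_dsum_lt l1 l2 l3 i1 i2 i3 c.1 c.2

lemma pvScs_base (l1 l2 l3 : List Char) (i1 i2 i3 : Nat)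
    (h : pvTwoDone l1.length l2.length l3.length i1 i2 i3) :
    pvScs l1 l2 l3 i1 i2 i3 =
      (((l1.length - i1) + (l2.length - i2) + (l3.length - i3) : Nat) : Int) := by
  rw [pvScs]
  simp [h]

lemma pvScs_rec (l1 l2 l3 : List Char) (i1 i2 i3 : Nat)
    (h : ¬ pvTwoDone l1.length l2.length l3.length i1 i2 i3) :
    pvScs l1 l2 l3 i1 i2 i3 =
      1 + pvMinD ((pvFronts l1 l2 l3 i1 i2 i3).map
        (fun c =>
          let p := pvStep l1 l2 l3 i1 i2 i3 c
          pvScs l1 l2 l3 p.1 p.2.1 p.2.2)) := by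
  rw [pvScs]
  rw [if_neg h]
  congr 1
  congr 1
  conv_rhs => rw [← List.attach_map_subtype_val (pvFronts l1 l2 l3 i1 i2 i3)]
  rw [List.map_map]
  rfl

lemma pvFrontList_ne_nil (l1 l2 l3 : List Char) (i1 i2 i3 : Nat)
    (hb : pvInb l1.length l2.length l3.length (i1, i2, i3))
    (h : ¬ pvTwoDone l1.length l2.length l3.length i1 i2 i3) :
    pvFrontList l1 l2 l3 i1 i2 i3 ≠ [] := by
  have h1 : i1 ≤ l1.length := hb.1
  have h2 : i2 ≤ l2.length := hb.2.1
  by_cases b1 : i1 < l1.length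
  · simp [pvFrontList, b1]
  · by_cases b2 : i2 < l2.length
    · simp [pvFrontList, b2]
    · exfalso
      apply h
      have e1 : i1 = l1.length := by omega
      have e2 : i2 = l2.length := by omega
      subst e1; subst e2
      simp [pvTwoDone]

lemma pvFronts_ne_nil (l1 l2 l3 : List Char) (i1 i2 i3 : Nat)
    (hb : pvInb l1.length l2.length l3.length (i1, i2, i3))
    (h : ¬ pvTwoDone l1.length l2.length l3.length i1 i2 i3) :
    pvFronts l1 l2 l3 i1 i2 i3 ≠ [] := by
  have hne := pvFrontList_ne_nil l1 l2 l3 i1 i2 i3 hb h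
  obtain ⟨a, l', ha⟩ := List.exists_cons_of_ne_nil hne
  intro hnil
  have : a ∈ pvFronts l1 l2 l3 i1 i2 i3 := by
    unfold pvFronts
    rw [PySem.Set.mem_ofList, ha]
    exact List.mem_cons_self
  rw [hnil] at this
  exact List.not_mem_nil this

lemma pvStep_ge (l1 l2 l3 : List Char) (i1 i2 i3 : Nat) (c : Char) :
    i1 ≤ (pvStep l1 l2 l3 i1 i2 i3 c).1 ∧ i2 ≤ (pvStep l1 l2 l3 i1 i2 i3 c).2.1 ∧
      i3 ≤ (pvStep l1 l2 l3 i1 i2 i3 c).2.2 ∧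
      (pvStep l1 l2 l3 i1 i2 i3 c).1 ≤ i1 + 1 ∧ (pvStep l1 l2 l3 i1 i2 i3 c).2.1 ≤ i2 + 1 ∧
      (pvStep l1 l2 l3 i1 i2 i3 c).2.2 ≤ i3 + 1 := by
  unfold pvStep
  refine ⟨?_, ?_, ?_, ?_, ?_, ?_⟩ <;> dsimp only <;> split_ifs <;> simp

-- running-min loops compute pvMinD
lemma pvFoldl_min_scan {α : Type} (f : α → Int) (ps : List α) (q0 : α) (v0 : Int) :
    (ps.foldl (fun (st : α × Int) p => if f p < st.2 then (p, f p) else st) (q0, v0)).2 =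
      ps.foldl (fun m p => min m (f p)) v0 := by
  induction ps generalizing q0 v0 with
  | nil => rfl
  | cons p ps ih =>
    simp only [List.foldl_cons]
    by_cases h : f p < v0
    · rw [if_pos h, ih]
      congr 1
      omega
    · rw [if_neg h, ih]
      congr 1
      omega

lemma pvMinD_scan {α : Type} (f : α → Int) (p0 : α) (rest : List α) :
    ((p0 :: rest).foldl (fun (st : α × Int) p => if f p < st.2 then (p, f p) else st)
      (p0, f p0)).2 = pvMinD ((p0 :: rest).map f) := by
  rw [pvFoldl_min_scan]
  simp only [List.foldl_cons, List.map_cons, pvMinD]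
  rw [List.foldl_map]
  congr 1
  omega

-- ---------- A side ----------

def pvDims (n1 n2 n3 : Nat) (dp : List (List (List Int))) : Prop :=
  dp.length = n1 + 1 ∧ ∀ row ∈ dp, row.length = n2 + 1 ∧ ∀ col ∈ row, col.length = n3 + 1

def pvInvA (l1 l2 l3 : List Char) (P : Nat × Nat × Nat → Prop) (dp : List (List (List Int))) : Prop :=
  pvDims l1.length l2.length l3.length dp ∧
  ∀ q, pvInb l1.length l2.length l3.length q → P q →
    pvGet3 dp q.1 q.2.1 q.2.2 = pvScs l1 l2 l3 q.1 q.2.1 q.2.2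

lemma pvDims_replicate (n1 n2 n3 : Nat) (v : Int) :
    pvDims n1 n2 n3 (List.replicate (n1+1) (List.replicate (n2+1) (List.replicate (n3+1) v))) := by
  refine ⟨List.length_replicate, ?_⟩
  intro row hrow
  rw [List.eq_of_mem_replicate hrow]
  refine ⟨List.length_replicate, ?_⟩
  intro col hcol
  rw [List.eq_of_mem_replicate hcol]
  exact List.length_replicate

lemma pvDims_set3 (n1 n2 n3 : Nat) (dp : List (List (List Int))) (i j k : Nat) (v : Int)
    (hd : pvDims n1 n2 n3 dp) (hi : i ≤ n1) (hj : j ≤ n2) (_hk : k ≤ n3) :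
    pvDims n1 n2 n3 (pvSet3 dp i j k v) := by
  obtain ⟨hl, hr⟩ := hd
  have hi' : i < dp.length := by omega
  have hrowmem : dp.getD i [] ∈ dp := by
    rw [List.getD_eq_getElem dp [] hi']
    exact List.getElem_mem hi'
  obtain ⟨hl2, hr2⟩ := hr _ hrowmem
  have hj' : j < (dp.getD i []).length := by omega
  have hcolmem : (dp.getD i []).getD j [] ∈ dp.getD i [] := by
    rw [List.getD_eq_getElem _ [] hj']
    exact List.getElem_mem hj'
  unfold pvSet3
  refine ⟨by simpa using hl, ?_⟩
  intro row hrow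
  rcases List.mem_or_eq_of_mem_set hrow with hmem | heq
  · exact hr row hmem
  · subst heq
    refine ⟨by simpa using hl2, ?_⟩
    intro col hcol
    rcases List.mem_or_eq_of_mem_set hcol with hmem2 | heq2
    · exact hr2 col hmem2
    · subst heq2
      simpa using hr2 _ hcolmem

lemma pvGetD_set_self {α : Type} (l : List α) (i : Nat) (a d : α) (h : i < l.length) :
    (l.set i a).getD i d = a := by
  simp [List.getD_eq_getElem?_getD, List.getElem?_set_eq_of_lt _ h]

lemma pvGetD_set_ne {α : Type} (l : List α) (i x : Nat) (a d : α) (h : i ≠ x) :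
    (l.set i a).getD x d = l.getD x d := by
  simp [List.getD_eq_getElem?_getD, h]

lemma pvGet3_set3 (n1 n2 n3 : Nat) (dp : List (List (List Int))) (i j k : Nat) (v : Int)
    (hd : pvDims n1 n2 n3 dp) (hi : i ≤ n1) (hj : j ≤ n2) (hk : k ≤ n3) (x y z : Nat) :
    pvGet3 (pvSet3 dp i j k v) x y z =
      if x = i ∧ y = j ∧ z = k then v else pvGet3 dp x y z := by
  obtain ⟨hl, hr⟩ := hd
  have hi' : i < dp.length := by omega
  have hrowmem : dp.getD i [] ∈ dp := by
    rw [List.getD_eq_getElem dp [] hi']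
    exact List.getElem_mem hi'
  obtain ⟨hl2, hr2⟩ := hr _ hrowmem
  have hj' : j < (dp.getD i []).length := by omega
  have hcolmem : (dp.getD i []).getD j [] ∈ dp.getD i [] := by
    rw [List.getD_eq_getElem _ [] hj']
    exact List.getElem_mem hj'
  have hk' : k < ((dp.getD i []).getD j []).length := by
    have := hr2 _ hcolmem
    omega
  unfold pvGet3 pvSet3
  by_cases hx : x = i
  · subst hx
    rw [pvGetD_set_self _ _ _ _ hi']
    by_cases hy : y = j
    · subst hy
      rw [pvGetD_set_self _ _ _ _ hj']
      by_cases hz : z = k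
      · subst hz
        rw [pvGetD_set_self _ _ _ _ hk']
        simp
      · rw [pvGetD_set_ne _ _ _ _ _ (fun h => hz h.symm)]
        simp [hz]
    · rw [pvGetD_set_ne _ _ _ _ _ (fun h => hy h.symm)]
      simp [hy]
  · rw [pvGetD_set_ne _ _ _ _ _ (fun h => hx h.symm)]
    simp [hx]

lemma pvDims_foldl {α : Type} (n1 n2 n3 : Nat) (l : List α)
    (F : List (List (List Int)) → α → List (List (List Int)))
    (h : ∀ dp a, a ∈ l → pvDims n1 n2 n3 dp → pvDims n1 n2 n3 (F dp a))
    (dp : List (List (List Int))) (hd : pvDims n1 n2 n3 dp) :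
    pvDims n1 n2 n3 (l.foldl F dp) := by
  induction l generalizing dp with
  | nil => exact hd
  | cons a l ih =>
    exact ih (fun dp b hb hd => h dp b (List.mem_cons_of_mem a hb) hd) (F dp a)
      (h dp a List.mem_cons_self hd)

lemma pvLoop1_get (n1 n2 n3 : Nat) (dp : List (List (List Int))) (k : Nat)
    (hd : pvDims n1 n2 n3 dp) (hk : k ≤ n1 + 1) (x y z : Nat)
    (hx : x ≤ n1) (hy : y ≤ n2) (hz : z ≤ n3) :
    pvGet3 ((List.range k).foldl (fun dp i1 => pvSet3 dp i1 n2 n3 ((n1 : Int) - i1)) dp) x y z =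
      if x < k ∧ y = n2 ∧ z = n3 then ((n1 : Int) - x) else pvGet3 dp x y z := by
  induction k generalizing x y z with
  | zero => simp
  | succ k ih =>
    rw [List.range_succ, List.foldl_append, List.foldl_cons, List.foldl_nil]
    have hdf : pvDims n1 n2 n3 ((List.range k).foldl (fun dp i1 => pvSet3 dp i1 n2 n3 ((n1 : Int) - i1)) dp) := by
      refine pvDims_foldl n1 n2 n3 _ _ ?_ dp hd
      intro dp a ha hdd
      have := List.mem_range.1 ha
      exact pvDims_set3 n1 n2 n3 dp _ _ _ _ hdd (by omega) (le_refl _) (le_refl _)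
    rw [pvGet3_set3 n1 n2 n3 _ _ _ _ _ hdf (by omega) (le_refl _) (le_refl _) x y z]
    rw [ih (by omega) x y z hx hy hz]
    split_ifs <;> first | rfl | omega

lemma pvLoop2_get (n1 n2 n3 : Nat) (dp : List (List (List Int))) (k : Nat)
    (hd : pvDims n1 n2 n3 dp) (hk : k ≤ n2 + 1) (x y z : Nat)
    (hx : x ≤ n1) (hy : y ≤ n2) (hz : z ≤ n3) :
    pvGet3 ((List.range k).foldl (fun dp i2 => pvSet3 dp n1 i2 n3 ((n2 : Int) - i2)) dp) x y z =
      if x = n1 ∧ y < k ∧ z = n3 then ((n2 : Int) - y) else pvGet3 dp x y z := by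
  induction k generalizing x y z with
  | zero => simp
  | succ k ih =>
    rw [List.range_succ, List.foldl_append, List.foldl_cons, List.foldl_nil]
    have hdf : pvDims n1 n2 n3 ((List.range k).foldl (fun dp i2 => pvSet3 dp n1 i2 n3 ((n2 : Int) - i2)) dp) := by
      refine pvDims_foldl n1 n2 n3 _ _ ?_ dp hd
      intro dp a ha hdd
      have := List.mem_range.1 ha
      exact pvDims_set3 n1 n2 n3 dp _ _ _ _ hdd (le_refl _) (by omega) (le_refl _)
    rw [pvGet3_set3 n1 n2 n3 _ _ _ _ _ hdf (le_refl _) (by omega) (le_refl _) x y z]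
    rw [ih (by omega) x y z hx hy hz]
    split_ifs <;> first | rfl | omega

lemma pvLoop3_get (n1 n2 n3 : Nat) (dp : List (List (List Int))) (k : Nat)
    (hd : pvDims n1 n2 n3 dp) (hk : k ≤ n3 + 1) (x y z : Nat)
    (hx : x ≤ n1) (hy : y ≤ n2) (hz : z ≤ n3) :
    pvGet3 ((List.range k).foldl (fun dp i3 => pvSet3 dp n1 n2 i3 ((n3 : Int) - i3)) dp) x y z =
      if x = n1 ∧ y = n2 ∧ z < k then ((n3 : Int) - z) else pvGet3 dp x y z := by
  induction k generalizing x y z with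
  | zero => simp
  | succ k ih =>
    rw [List.range_succ, List.foldl_append, List.foldl_cons, List.foldl_nil]
    have hdf : pvDims n1 n2 n3 ((List.range k).foldl (fun dp i3 => pvSet3 dp n1 n2 i3 ((n3 : Int) - i3)) dp) := by
      refine pvDims_foldl n1 n2 n3 _ _ ?_ dp hd
      intro dp a ha hdd
      have := List.mem_range.1 ha
      exact pvDims_set3 n1 n2 n3 dp _ _ _ _ hdd (le_refl _) (le_refl _) (by omega)
    rw [pvGet3_set3 n1 n2 n3 _ _ _ _ _ hdf (le_refl _) (le_refl _) (by omega) x y z]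
    rw [ih (by omega) x y z hx hy hz]
    split_ifs <;> first | rfl | omega

def pvBase (n1 n2 n3 : Nat) (q : Nat × Nat × Nat) : Prop :=
  pvTwoDone n1 n2 n3 q.1 q.2.1 q.2.2 = true

lemma pvTwoDone_iff (n1 n2 n3 i1 i2 i3 : Nat) :
    pvTwoDone n1 n2 n3 i1 i2 i3 = true ↔
      ((i1 = n1 ∧ i2 = n2) ∨ (i1 = n1 ∧ i3 = n3) ∨ (i2 = n2 ∧ i3 = n3)) := by
  unfold pvTwoDone
  by_cases e1 : i1 = n1 <;> by_cases e2 : i2 = n2 <;> by_cases e3 : i3 = n3 <;>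
    simp [e1, e2, e3]

lemma pvInvA_mono (l1 l2 l3 : List Char) (P P' : Nat × Nat × Nat → Prop)
    (dp : List (List (List Int))) (h : pvInvA l1 l2 l3 P dp)
    (hPP : ∀ q, pvInb l1.length l2.length l3.length q → P' q → P q) :
    pvInvA l1 l2 l3 P' dp := by
  obtain ⟨hd, hv⟩ := h
  exact ⟨hd, fun q hq hP => hv q hq (hPP q hq hP)⟩

lemma pvBodyA_inv (l1 l2 l3 : List Char) (P : Nat × Nat × Nat → Prop)
    (dp : List (List (List Int))) (i1 i2 i3 : Nat)
    (hi : i1 ≤ l1.length) (hj : i2 ≤ l2.length) (hk : i3 ≤ l3.length)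
    (h : pvInvA l1 l2 l3 P dp)
    (hbase : pvBase l1.length l2.length l3.length (i1, i2, i3) → P (i1, i2, i3))
    (hchild : ∀ q, pvInb l1.length l2.length l3.length q →
      (i1 ≤ q.1 ∧ i2 ≤ q.2.1 ∧ i3 ≤ q.2.2 ∧ q ≠ (i1, i2, i3)) → P q) :
    pvInvA l1 l2 l3 (fun q => P q ∨ q = (i1, i2, i3)) (pvBodyA l1 l2 l3 dp i1 i2 i3) := by
  obtain ⟨hd, hv⟩ := h
  unfold pvBodyA
  by_cases hb : pvTwoDone l1.length l2.length l3.length i1 i2 i3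
  · rw [if_pos hb]
    refine ⟨hd, ?_⟩
    intro q hq hP
    rcases hP with hP | rfl
    · exact hv q hq hP
    · exact hv _ hq (hbase hb)
  · rw [if_neg hb]
    have hfne := pvFronts_ne_nil l1 l2 l3 i1 i2 i3 ⟨hi, hj, hk⟩ hb
    obtain ⟨c0, cs, hcs⟩ : ∃ c0 cs, pvFronts l1 l2 l3 i1 i2 i3 = c0 :: cs := by
      cases hfl : pvFronts l1 l2 l3 i1 i2 i3 with
      | nil => exact absurd hfl hfne
      | cons a b => exact ⟨a, b, rfl⟩
    rw [hcs]
    simp only [List.map_cons]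
    rw [pvMinD_scan (fun p => pvGet3 dp p.1 p.2.1 p.2.2) (pvStep l1 l2 l3 i1 i2 i3 c0)
      (List.map (pvStep l1 l2 l3 i1 i2 i3) cs)]
    have hchild' : ∀ c, c ∈ c0 :: cs →
        pvGet3 dp (pvStep l1 l2 l3 i1 i2 i3 c).1 (pvStep l1 l2 l3 i1 i2 i3 c).2.1
            (pvStep l1 l2 l3 i1 i2 i3 c).2.2 =
          pvScs l1 l2 l3 (pvStep l1 l2 l3 i1 i2 i3 c).1 (pvStep l1 l2 l3 i1 i2 i3 c).2.1
            (pvStep l1 l2 l3 i1 i2 i3 c).2.2 := by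
      intro c hc
      have hcf : c ∈ pvFronts l1 l2 l3 i1 i2 i3 := by rw [hcs]; exact hc
      have hlt := pvStep_dsum_lt l1 l2 l3 i1 i2 i3 c hcf
      have hge := pvStep_ge l1 l2 l3 i1 i2 i3 c
      have hinb := pvStep_inb l1 l2 l3 i1 i2 i3 c ⟨hi, hj, hk⟩
      have hne : pvStep l1 l2 l3 i1 i2 i3 c ≠ (i1, i2, i3) := by
        intro heq
        rw [heq] at hlt
        omega
      exact hv _ hinb (hchild _ hinb ⟨hge.1, hge.2.1, hge.2.2.1, hne⟩)
    refine ⟨pvDims_set3 _ _ _ _ _ _ _ _ hd hi hj hk, ?_⟩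
    intro q hq hP
    obtain ⟨a, b, c⟩ := q
    have hq1 : a ≤ l1.length := hq.1
    have hq2 : b ≤ l2.length := hq.2.1
    have hq3 : c ≤ l3.length := hq.2.2
    rw [pvGet3_set3 _ _ _ _ _ _ _ _ hd hi hj hk]
    by_cases hqe : (a, b, c) = ((i1 : Nat), (i2 : Nat), (i3 : Nat))
    · obtain ⟨ha, hb2, hc2⟩ : a = i1 ∧ b = i2 ∧ c = i3 := by simp_all [Prod.ext_iff]
      rw [if_pos ⟨ha, hb2, hc2⟩]
      simp only [ha, hb2, hc2]
      rw [pvScs_rec l1 l2 l3 i1 i2 i3 hb, hcs]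
      simp only [List.map_cons, List.map_map]
      have e0 := hchild' c0 List.mem_cons_self
      rw [e0]
      have : List.map ((fun p => pvGet3 dp p.1 p.2.1 p.2.2) ∘ pvStep l1 l2 l3 i1 i2 i3) cs =
          List.map (fun c =>
            pvScs l1 l2 l3 (pvStep l1 l2 l3 i1 i2 i3 c).1 (pvStep l1 l2 l3 i1 i2 i3 c).2.1
              (pvStep l1 l2 l3 i1 i2 i3 c).2.2) cs := by
        refine List.map_congr_left ?_
        intro c hc
        exact hchild' c (List.mem_cons_of_mem c0 hc)
      rw [this]
      omega
    · rw [if_neg (by simp_all [Prod.ext_iff])]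
      rcases hP with hP | heq
      · exact hv _ hq hP
      · exact absurd heq hqe

def pvDoneA3 (n1 n2 n3 i1 i2 k : Nat) (q : Nat × Nat × Nat) : Prop :=
  pvBase n1 n2 n3 q ∨ i1 < q.1 ∨ (q.1 = i1 ∧ (i2 < q.2.1 ∨ (q.2.1 = i2 ∧ k ≤ q.2.2)))

def pvDoneA2 (n1 n2 n3 i1 k : Nat) (q : Nat × Nat × Nat) : Prop :=
  pvBase n1 n2 n3 q ∨ i1 < q.1 ∨ (q.1 = i1 ∧ k ≤ q.2.1)

def pvDoneA1 (n1 n2 n3 k : Nat) (q : Nat × Nat × Nat) : Prop :=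
  pvBase n1 n2 n3 q ∨ k ≤ q.1

lemma pvLoopA3 (l1 l2 l3 : List Char) (i1 i2 : Nat) (hi : i1 ≤ l1.length) (hj : i2 ≤ l2.length)
    (k : Nat) (hk : k ≤ l3.length + 1) (dp : List (List (List Int)))
    (h : pvInvA l1 l2 l3 (pvDoneA3 l1.length l2.length l3.length i1 i2 k) dp) :
    pvInvA l1 l2 l3 (pvDoneA3 l1.length l2.length l3.length i1 i2 0)
      (((List.range k).reverse).foldl (fun dp i3 => pvBodyA l1 l2 l3 dp i1 i2 i3) dp) := by
  induction k generalizing dp with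
  | zero => simpa using h
  | succ k ih =>
    rw [List.range_succ, List.reverse_append]
    simp only [List.reverse_cons, List.reverse_nil, List.nil_append, List.singleton_append,
      List.foldl_cons]
    apply ih (by omega)
    have hstep := pvBodyA_inv l1 l2 l3 (pvDoneA3 l1.length l2.length l3.length i1 i2 (k + 1))
      dp i1 i2 k hi hj (by omega) h
      (fun hb => Or.inl hb)
      ?hchild
    · refine pvInvA_mono l1 l2 l3 _ _ _ hstep ?_
      intro q hq hP
      obtain ⟨a, b, c⟩ := q
      have hq1 : a ≤ l1.length := hq.1
      have hq2 : b ≤ l2.length := hq.2.1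
      have hq3 : c ≤ l3.length := hq.2.2
      dsimp only [pvDoneA3, pvDoneA2, pvDoneA1, pvBase]
      dsimp only [pvDoneA3, pvDoneA2, pvDoneA1, pvBase] at hP
      rcases hP with h0 | h1 | ⟨he, h2⟩
      · exact Or.inl (Or.inl h0)
      · exact Or.inl (Or.inr (Or.inl h1))
      · rcases h2 with h2 | ⟨he2, h3⟩
        · exact Or.inl (Or.inr (Or.inr ⟨he, Or.inl h2⟩))
        · by_cases hck : k + 1 ≤ c
          · exact Or.inl (Or.inr (Or.inr ⟨he, Or.inr ⟨he2, hck⟩⟩))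
          · have hc : c = k := by omega
            exact Or.inr (by rw [he, he2, hc])
    case hchild =>
      intro q hq hx
      obtain ⟨a, b, c⟩ := q
      have hq1 : a ≤ l1.length := hq.1
      have hq2 : b ≤ l2.length := hq.2.1
      have hq3 : c ≤ l3.length := hq.2.2
      dsimp only [pvDoneA3, pvDoneA2, pvDoneA1, pvBase]
      obtain ⟨g1, g2, g3, g4⟩ := hx
      have g1' : i1 ≤ a := g1
      have g2' : i2 ≤ b := g2
      have g3' : k ≤ c := g3
      simp only [ne_eq, Prod.mk.injEq, not_and] at g4
      right
      by_cases e1 : a = i1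
      · refine Or.inr ⟨e1, ?_⟩
        by_cases e2 : b = i2
        · refine Or.inr ⟨e2, ?_⟩
          have hck := g4 e1 e2
          omega
        · exact Or.inl (by omega)
      · exact Or.inl (by omega)

lemma pvLoopA2 (l1 l2 l3 : List Char) (i1 : Nat) (hi : i1 ≤ l1.length)
    (k : Nat) (hk : k ≤ l2.length + 1) (dp : List (List (List Int)))
    (h : pvInvA l1 l2 l3 (pvDoneA2 l1.length l2.length l3.length i1 k) dp) :
    pvInvA l1 l2 l3 (pvDoneA2 l1.length l2.length l3.length i1 0)
      (((List.range k).reverse).foldl (fun dp i2 =>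
        ((List.range (l3.length + 1)).reverse).foldl (fun dp i3 =>
          pvBodyA l1 l2 l3 dp i1 i2 i3) dp) dp) := by
  induction k generalizing dp with
  | zero => simpa using h
  | succ k ih =>
    rw [show (List.range (k + 1)).reverse = k :: (List.range k).reverse by
      rw [List.range_succ]; simp]
    rw [List.foldl_cons]
    apply ih (by omega)
    have hpre : pvInvA l1 l2 l3 (pvDoneA3 l1.length l2.length l3.length i1 k (l3.length + 1)) dp := by
      refine pvInvA_mono l1 l2 l3 _ _ _ h ?_
      intro q hq hP
      obtain ⟨a, b, c⟩ := q
      have hq1 : a ≤ l1.length := hq.1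
      have hq2 : b ≤ l2.length := hq.2.1
      have hq3 : c ≤ l3.length := hq.2.2
      dsimp only [pvDoneA3, pvDoneA2, pvBase] at hP ⊢
      rcases hP with h0 | hP
      · exact Or.inl h0
      · right
        omega
    have hstep := pvLoopA3 l1 l2 l3 i1 k hi (by omega) (l3.length + 1) (by omega) dp hpre
    refine pvInvA_mono l1 l2 l3 _ _ _ hstep ?_
    intro q hq hP
    obtain ⟨a, b, c⟩ := q
    have hq1 : a ≤ l1.length := hq.1
    have hq2 : b ≤ l2.length := hq.2.1
    have hq3 : c ≤ l3.length := hq.2.2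
    dsimp only [pvDoneA3, pvDoneA2, pvBase] at hP ⊢
    rcases hP with h0 | hP
    · exact Or.inl h0
    · right
      omega

lemma pvLoopA1 (l1 l2 l3 : List Char) (k : Nat) (hk : k ≤ l1.length + 1)
    (dp : List (List (List Int)))
    (h : pvInvA l1 l2 l3 (pvDoneA1 l1.length l2.length l3.length k) dp) :
    pvInvA l1 l2 l3 (pvDoneA1 l1.length l2.length l3.length 0)
      (((List.range k).reverse).foldl (fun dp i1 =>
        ((List.range (l2.length + 1)).reverse).foldl (fun dp i2 =>
          ((List.range (l3.length + 1)).reverse).foldl (fun dp i3 =>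
            pvBodyA l1 l2 l3 dp i1 i2 i3) dp) dp) dp) := by
  induction k generalizing dp with
  | zero => simpa using h
  | succ k ih =>
    rw [show (List.range (k + 1)).reverse = k :: (List.range k).reverse by
      rw [List.range_succ]; simp]
    rw [List.foldl_cons]
    apply ih (by omega)
    have hpre : pvInvA l1 l2 l3 (pvDoneA2 l1.length l2.length l3.length k (l2.length + 1)) dp := by
      refine pvInvA_mono l1 l2 l3 _ _ _ h ?_
      intro q hq hP
      obtain ⟨a, b, c⟩ := q
      have hq1 : a ≤ l1.length := hq.1
      have hq2 : b ≤ l2.length := hq.2.1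
      have hq3 : c ≤ l3.length := hq.2.2
      dsimp only [pvDoneA2, pvDoneA1, pvBase] at hP ⊢
      rcases hP with h0 | hP
      · exact Or.inl h0
      · right
        omega
    have hstep := pvLoopA2 l1 l2 l3 k (by omega) (l2.length + 1) (by omega) dp hpre
    refine pvInvA_mono l1 l2 l3 _ _ _ hstep ?_
    intro q hq hP
    obtain ⟨a, b, c⟩ := q
    have hq1 : a ≤ l1.length := hq.1
    have hq2 : b ≤ l2.length := hq.2.1
    have hq3 : c ≤ l3.length := hq.2.2
    dsimp only [pvDoneA2, pvDoneA1, pvBase] at hP ⊢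
    rcases hP with h0 | hP
    · exact Or.inl h0
    · right
      omega

lemma pvInitA (l1 l2 l3 : List Char) :
    pvInvA l1 l2 l3 (pvBase l1.length l2.length l3.length)
      ((List.range (l3.length + 1)).foldl
        (fun dp i3 => pvSet3 dp l1.length l2.length i3 ((l3.length : Int) - i3))
        ((List.range (l2.length + 1)).foldl
          (fun dp i2 => pvSet3 dp l1.length i2 l3.length ((l2.length : Int) - i2))
          ((List.range (l1.length + 1)).foldl
            (fun dp i1 => pvSet3 dp i1 l2.length l3.length ((l1.length : Int) - i1))
            (List.replicate (l1.length + 1) (List.replicate (l2.length + 1)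
              (List.replicate (l3.length + 1)
                ((l1.length + l2.length + l3.length + 1 : Nat) : Int))))))) := by
  have hd0 := pvDims_replicate l1.length l2.length l3.length
    ((l1.length + l2.length + l3.length + 1 : Nat) : Int)
  have hd1 : pvDims l1.length l2.length l3.length
      ((List.range (l1.length + 1)).foldl
        (fun dp i1 => pvSet3 dp i1 l2.length l3.length ((l1.length : Int) - i1))
        (List.replicate (l1.length + 1) (List.replicate (l2.length + 1)
          (List.replicate (l3.length + 1)
            ((l1.length + l2.length + l3.length + 1 : Nat) : Int))))) := by
    refine pvDims_foldl _ _ _ _ _ ?_ _ hd0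
    intro dp a ha hdd
    have := List.mem_range.1 ha
    exact pvDims_set3 _ _ _ _ _ _ _ _ hdd (by omega) (le_refl _) (le_refl _)
  have hd2 : pvDims l1.length l2.length l3.length
      ((List.range (l2.length + 1)).foldl
        (fun dp i2 => pvSet3 dp l1.length i2 l3.length ((l2.length : Int) - i2))
        ((List.range (l1.length + 1)).foldl
          (fun dp i1 => pvSet3 dp i1 l2.length l3.length ((l1.length : Int) - i1))
          (List.replicate (l1.length + 1) (List.replicate (l2.length + 1)
            (List.replicate (l3.length + 1)
              ((l1.length + l2.length + l3.length + 1 : Nat) : Int)))))) := by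
    refine pvDims_foldl _ _ _ _ _ ?_ _ hd1
    intro dp a ha hdd
    have := List.mem_range.1 ha
    exact pvDims_set3 _ _ _ _ _ _ _ _ hdd (le_refl _) (by omega) (le_refl _)
  have hd3 : pvDims l1.length l2.length l3.length
      ((List.range (l3.length + 1)).foldl
        (fun dp i3 => pvSet3 dp l1.length l2.length i3 ((l3.length : Int) - i3))
        ((List.range (l2.length + 1)).foldl
          (fun dp i2 => pvSet3 dp l1.length i2 l3.length ((l2.length : Int) - i2))
          ((List.range (l1.length + 1)).foldl
            (fun dp i1 => pvSet3 dp i1 l2.length l3.length ((l1.length : Int) - i1))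
            (List.replicate (l1.length + 1) (List.replicate (l2.length + 1)
              (List.replicate (l3.length + 1)
                ((l1.length + l2.length + l3.length + 1 : Nat) : Int))))))) := by
    refine pvDims_foldl _ _ _ _ _ ?_ _ hd2
    intro dp a ha hdd
    have := List.mem_range.1 ha
    exact pvDims_set3 _ _ _ _ _ _ _ _ hdd (le_refl _) (le_refl _) (by omega)
  refine ⟨hd3, ?_⟩
  intro q hq hbq
  obtain ⟨a, b, c⟩ := q
  have hq1 : a ≤ l1.length := hq.1
  have hq2 : b ≤ l2.length := hq.2.1
  have hq3 : c ≤ l3.length := hq.2.2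
  rw [pvLoop3_get l1.length l2.length l3.length _ (l3.length + 1) hd2 (le_refl _) a b c hq1 hq2 hq3]
  rw [pvLoop2_get l1.length l2.length l3.length _ (l2.length + 1) hd1 (le_refl _) a b c hq1 hq2 hq3]
  rw [pvLoop1_get l1.length l2.length l3.length _ (l1.length + 1) hd0 (le_refl _) a b c hq1 hq2 hq3]
  rw [pvScs_base l1 l2 l3 a b c hbq]
  rcases (pvTwoDone_iff l1.length l2.length l3.length a b c).1 hbq with ⟨e1, e2⟩ | ⟨e1, e3⟩ | ⟨e2, e3⟩ <;>
    split_ifs <;> omega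

lemma pvTable_eq (n1 n2 n3 : Nat) (dp : List (List (List Int))) (f : Nat → Nat → Nat → Int)
    (hd : pvDims n1 n2 n3 dp)
    (h : ∀ x y z, x ≤ n1 → y ≤ n2 → z ≤ n3 → pvGet3 dp x y z = f x y z) :
    dp = (List.range (n1 + 1)).map (fun x =>
      (List.range (n2 + 1)).map (fun y =>
        (List.range (n3 + 1)).map (fun z => f x y z))) := by
  obtain ⟨hl, hr⟩ := hd
  apply List.ext_getElem (by simp [hl])
  intro i hi1 hi2
  have hrow : dp[i] ∈ dp := List.getElem_mem _
  obtain ⟨hl2, hr2⟩ := hr _ hrow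
  rw [List.getElem_map, List.getElem_range]
  apply List.ext_getElem (by simp [hl2])
  intro j hj1 hj2
  have hcol : dp[i][j] ∈ dp[i] := List.getElem_mem _
  have hl3 := hr2 _ hcol
  rw [List.getElem_map, List.getElem_range]
  apply List.ext_getElem (by simp [hl3])
  intro k hk1 hk2
  rw [List.getElem_map, List.getElem_range]
  have hx : i ≤ n1 := by omega
  have hy : j ≤ n2 := by omega
  have hz : k ≤ n3 := by omega
  have hv := h i j k hx hy hz
  unfold pvGet3 at hv
  rw [List.getD_eq_getElem dp [] (by omega)] at hv
  rw [List.getD_eq_getElem dp[i] [] (by omega)] at hv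
  rw [List.getD_eq_getElem dp[i][j] 0 (by omega)] at hv
  exact hv

lemma pvA_eq (s1 s2 s3 : String) :
    boundtable_scs3 s1 s2 s3 =
      (List.range (s1.toList.length + 1)).map (fun x =>
        (List.range (s2.toList.length + 1)).map (fun y =>
          (List.range (s3.toList.length + 1)).map (fun z =>
            pvScs s1.toList s2.toList s3.toList x y z))) := by
  unfold boundtable_scs3
  have h0 := pvInitA s1.toList s2.toList s3.toList
  have h1 := pvInvA_mono s1.toList s2.toList s3.toList _
    (pvDoneA1 s1.toList.length s2.toList.length s3.toList.length (s1.toList.length + 1)) _ h0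
    (by
      intro q hq hP
      rcases hP with hb | hge
      · exact hb
      · exact absurd hge (by have := hq.1; omega))
  have h2 := pvLoopA1 s1.toList s2.toList s3.toList (s1.toList.length + 1) (le_refl _) _ h1
  exact pvTable_eq s1.toList.length s2.toList.length s3.toList.length _ _ h2.1
    (fun x y z hx hy hz => h2.2 (x, y, z) ⟨hx, hy, hz⟩ (Or.inr (Nat.zero_le _)))

-- ---------- B side ----------

lemma pvMinD_min? (l : List Int) (h : l ≠ []) :
    PySem.List.min? l (fun x => x) = some (pvMinD l) := by
  cases l with
  | nil => exact absurd rfl h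
  | cons x xs =>
    rw [PySem.List.min?_id_cons]
    rfl

lemma pvMinD_mem (l : List Int) (h : l ≠ []) : pvMinD l ∈ l :=
  PySem.List.min?_mem (pvMinD_min? l h)

lemma pvMinD_le (l : List Int) (x : Int) (hx : x ∈ l) : pvMinD l ≤ x := by
  have hne : l ≠ [] := by
    intro hnil
    rw [hnil] at hx
    exact List.not_mem_nil hx
  exact PySem.List.min?_isMin (pvMinD_min? l hne) x hx

lemma pvMinD_congr (l1 l2 : List Int) (h1 : l1 ≠ []) (h2 : l2 ≠ [])
    (hm : ∀ x, x ∈ l1 ↔ x ∈ l2) : pvMinD l1 = pvMinD l2 := by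
  have a1 := pvMinD_mem l1 h1
  have a2 := pvMinD_mem l2 h2
  have b1 := pvMinD_le l2 _ ((hm _).1 a1)
  have b2 := pvMinD_le l1 _ ((hm _).2 a2)
  omega

-- a sound memo only holds correct suffix-SCS values
def pvSound (l1 l2 l3 : List Char) (m : PySem.Dict (Nat × Nat × Nat) Int) : Prop :=
  ∀ q v, m.get? q = some v → v = pvScs l1 l2 l3 q.1 q.2.1 q.2.2

lemma pvKids_ne_nil (l1 l2 l3 : List Char) (i1 i2 i3 : Nat)
    (hb : pvInb l1.length l2.length l3.length (i1, i2, i3))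
    (h : ¬ pvTwoDone l1.length l2.length l3.length i1 i2 i3) :
    pvKids l1 l2 l3 i1 i2 i3 ≠ [] := by
  unfold pvKids
  rw [ne_eq, List.map_eq_nil_iff]
  exact pvFrontList_ne_nil l1 l2 l3 i1 i2 i3 hb h

lemma pvLoop_spec (l1 l2 l3 : List Char) (stack : List (Nat × Nat × Nat))
    (memo : PySem.Dict (Nat × Nat × Nat) Int)
    (hst : ∀ t ∈ stack, pvInb l1.length l2.length l3.length t)
    (hs : pvSound l1 l2 l3 memo) :
    pvSound l1 l2 l3 (pvLoop l1 l2 l3 stack memo hst) ∧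
    (∀ q v, memo.get? q = some v → (pvLoop l1 l2 l3 stack memo hst).get? q = some v) ∧
    (∀ t ∈ stack, ((pvLoop l1 l2 l3 stack memo hst).get? t).isSome) := by
  revert hs
  fun_induction pvLoop l1 l2 l3 stack memo hst with
  | case1 memo hst =>
    intro hs
    exact ⟨hs, fun q v h => h, by simp⟩
  | case2 memo t rest hst h1 hst2 ih =>
    intro hs
    obtain ⟨ihs, ihm, ihmem⟩ := ih hs
    refine ⟨ihs, ihm, ?_⟩
    intro u hu
    rcases List.mem_cons.1 hu with rfl | hmem
    · obtain ⟨v, hv⟩ := Option.isSome_iff_exists.1 h1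
      rw [ihm u v hv]
      rfl
    · exact ihmem u hmem
  | case3 memo t rest hst h1 h2 hst2 ih =>
    intro hs
    have hn : memo.get? t = none := Option.not_isSome_iff_eq_none.mp h1
    have hs' : pvSound l1 l2 l3
        (memo.insert t (((l1.length - t.1) + (l2.length - t.2.1) + (l3.length - t.2.2) : Nat) : Int)) := by
      intro q v hv
      rw [PySem.Dict.get?_insert] at hv
      by_cases hqt : q = t
      · rw [if_pos hqt] at hv
        rw [hqt]
        rw [pvScs_base l1 l2 l3 t.1 t.2.1 t.2.2 h2]
        exact (Option.some_inj.mp hv).symm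
      · rw [if_neg hqt] at hv
        exact hs q v hv
    obtain ⟨ihs, ihm, ihmem⟩ := ih hs'
    have hmono : ∀ q v, memo.get? q = some v →
        (memo.insert t (((l1.length - t.1) + (l2.length - t.2.1) + (l3.length - t.2.2) : Nat) : Int)).get? q = some v := by
      intro q v hv
      rw [PySem.Dict.get?_insert]
      by_cases hqt : q = t
      · rw [hqt] at hv
        rw [hv] at hn
        exact absurd hn (by simp)
      · rw [if_neg hqt]
        exact hv
    refine ⟨ihs, fun q v hv => ihm q v (hmono q v hv), ?_⟩
    intro u hu
    rcases List.mem_cons.1 hu with rfl | hmem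
    · rw [ihm u _ (by rw [PySem.Dict.get?_insert, if_pos rfl])]
      rfl
    · exact ihmem u hmem
  | case4 memo t rest hst h1 h2 h3 hst2 ih =>
    intro hs
    have hn : memo.get? t = none := Option.not_isSome_iff_eq_none.mp h1
    have hinb : pvInb l1.length l2.length l3.length t := hst t List.mem_cons_self
    have hkne : pvKids l1 l2 l3 t.1 t.2.1 t.2.2 ≠ [] :=
      pvKids_ne_nil l1 l2 l3 t.1 t.2.1 t.2.2 hinb h2
    have hall : ∀ k ∈ pvKids l1 l2 l3 t.1 t.2.1 t.2.2, ∃ v, memo.get? k = some v := by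
      intro k hk
      have := List.filter_eq_nil_iff.1 h3 k hk
      simp only [Option.isNone_iff_eq_none] at this
      cases hg : memo.get? k with
      | none => exact absurd (by simpa using hg) (by simpa using this)
      | some v => exact ⟨v, rfl⟩
    -- the stored value is 1 + min over the children's (sound) memo values = pvScs t
    have hmapeq : (pvKids l1 l2 l3 t.1 t.2.1 t.2.2).map (fun k => (memo.get? k).getD 0) =
        (pvKids l1 l2 l3 t.1 t.2.1 t.2.2).map
          (fun k => pvScs l1 l2 l3 k.1 k.2.1 k.2.2) := by
      refine List.map_congr_left ?_
      intro k hk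
      obtain ⟨v, hv⟩ := hall k hk
      rw [hv]
      exact hs k v hv
    have hval : (1 + (PySem.List.min?
          ((pvKids l1 l2 l3 t.1 t.2.1 t.2.2).map (fun k => (memo.get? k).getD 0))
          (fun x => x)).getD 0) = pvScs l1 l2 l3 t.1 t.2.1 t.2.2 := by
      rw [hmapeq]
      rw [pvMinD_min? _ (by
        rw [ne_eq, List.map_eq_nil_iff]
        exact hkne)]
      rw [pvScs_rec l1 l2 l3 t.1 t.2.1 t.2.2 h2]
      simp only [Option.getD_some]
      congr 1
      apply pvMinD_congr
      · rw [ne_eq, List.map_eq_nil_iff]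
        exact hkne
      · rw [ne_eq, List.map_eq_nil_iff]
        exact pvFronts_ne_nil l1 l2 l3 t.1 t.2.1 t.2.2 hinb h2
      · intro x
        unfold pvKids pvFronts
        simp only [List.map_map, List.mem_map]
        constructor
        · rintro ⟨c, hc, rfl⟩
          exact ⟨c, (PySem.Set.mem_ofList _ _).2 hc, rfl⟩
        · rintro ⟨c, hc, rfl⟩
          exact ⟨c, (PySem.Set.mem_ofList _ _).1 hc, rfl⟩
    have hs' : pvSound l1 l2 l3 (memo.insert t (1 + (PySem.List.min?
        ((pvKids l1 l2 l3 t.1 t.2.1 t.2.2).map (fun k => (memo.get? k).getD 0))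
        (fun x => x)).getD 0)) := by
      intro q v hv
      rw [PySem.Dict.get?_insert] at hv
      by_cases hqt : q = t
      · rw [if_pos hqt] at hv
        rw [hqt]
        rw [← hval]
        exact (Option.some_inj.mp hv).symm
      · rw [if_neg hqt] at hv
        exact hs q v hv
    obtain ⟨ihs, ihm, ihmem⟩ := ih hs'
    have hmono : ∀ q v, memo.get? q = some v →
        (memo.insert t (1 + (PySem.List.min?
          ((pvKids l1 l2 l3 t.1 t.2.1 t.2.2).map (fun k => (memo.get? k).getD 0))
          (fun x => x)).getD 0)).get? q = some v := by
      intro q v hv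
      rw [PySem.Dict.get?_insert]
      by_cases hqt : q = t
      · rw [hqt] at hv
        rw [hv] at hn
        exact absurd hn (by simp)
      · rw [if_neg hqt]
        exact hv
    refine ⟨ihs, fun q v hv => ihm q v (hmono q v hv), ?_⟩
    intro u hu
    rcases List.mem_cons.1 hu with rfl | hmem
    · rw [ihm u _ (by rw [PySem.Dict.get?_insert, if_pos rfl])]
      rfl
    · exact ihmem u hmem
  | case5 memo t rest hst h1 h2 h3 hst2 ih =>
    intro hs
    obtain ⟨ihs, ihm, ihmem⟩ := ih hs
    refine ⟨ihs, ihm, ?_⟩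
    intro u hu
    exact ihmem u (List.mem_append.2 (Or.inr hu))

lemma pvCellInb (l1 l2 l3 : List Char) (a b c : Nat)
    (ha : a ∈ List.range (l1.length + 1)) (hb : b ∈ List.range (l2.length + 1))
    (hc : c ∈ List.range (l3.length + 1)) :
    ∀ u ∈ [((a, b, c) : Nat × Nat × Nat)], pvInb l1.length l2.length l3.length u := by
  intro u hu
  rw [List.mem_singleton] at hu
  subst hu
  exact ⟨Nat.lt_succ_iff.mp (List.mem_range.1 ha), Nat.lt_succ_iff.mp (List.mem_range.1 hb),
    Nat.lt_succ_iff.mp (List.mem_range.1 hc)⟩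

lemma pvSolve_spec (l1 l2 l3 : List Char) (t : Nat × Nat × Nat)
    (h : ∀ u ∈ [t], pvInb l1.length l2.length l3.length u)
    (m : PySem.Dict (Nat × Nat × Nat) Int) (hm : pvSound l1 l2 l3 m) :
    pvSound l1 l2 l3 (pvLoop l1 l2 l3 [t] m h) ∧
    ((pvLoop l1 l2 l3 [t] m h).get? t).getD 0 = pvScs l1 l2 l3 t.1 t.2.1 t.2.2 := by
  obtain ⟨hsnd, _, hmem⟩ := pvLoop_spec l1 l2 l3 [t] m h hm
  obtain ⟨v, hv⟩ := Option.isSome_iff_exists.1 (hmem t List.mem_cons_self)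
  refine ⟨hsnd, ?_⟩
  rw [hv]
  exact hsnd t v hv

-- the memo is threaded through the comprehensions; each appended value is the cell's SCS length
lemma pvFoldl_thread {α β μ : Type} (P : μ → Prop) (xs : List α)
    (F : μ × List β → α → μ × List β) (g : α → β)
    (hF : ∀ m acc x, x ∈ xs → P m → (F (m, acc) x).2 = acc ++ [g x] ∧ P (F (m, acc) x).1) :
    ∀ m acc, P m → (xs.foldl F (m, acc)).2 = acc ++ xs.map g ∧ P (xs.foldl F (m, acc)).1 := by
  induction xs with
  | nil => intro m acc hP; exact ⟨by simp, hP⟩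
  | cons x xs ih =>
    intro m acc hP
    have hx := hF m acc x List.mem_cons_self hP
    have hpair : F (m, acc) x = ((F (m, acc) x).1, acc ++ [g x]) := by
      rw [← hx.1]
    rw [List.foldl_cons, hpair]
    have := ih (fun m acc x hx hm => hF m acc x (List.mem_cons_of_mem _ hx) hm)
      (F (m, acc) x).1 (acc ++ [g x]) hx.2
    rw [List.map_cons]
    refine ⟨?_, this.2⟩
    rw [this.1]
    simp

lemma pvB_eq (s1 s2 s3 : String) :
    boundtable_scs3_alt s1 s2 s3 =
      (List.range (s1.toList.length + 1)).map (fun x =>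
        (List.range (s2.toList.length + 1)).map (fun y =>
          (List.range (s3.toList.length + 1)).map (fun z =>
            pvScs s1.toList s2.toList s3.toList x y z))) := by
  have h3 : ∀ (i1 : {x // x ∈ List.range (s1.toList.length + 1)})
      (i2 : {x // x ∈ List.range (s2.toList.length + 1)})
      (m : PySem.Dict (Nat × Nat × Nat) Int) (acc : List Int),
      pvSound s1.toList s2.toList s3.toList m →
      ((List.range (s3.toList.length + 1)).attach.foldl
        (fun (st3 : PySem.Dict (Nat × Nat × Nat) Int × List Int) (i3 : {x // x ∈ List.range (s3.toList.length + 1)}) =>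
          (pvLoop s1.toList s2.toList s3.toList [(i1.1, i2.1, i3.1)] st3.1
             (pvCellInb s1.toList s2.toList s3.toList i1.1 i2.1 i3.1 i1.2 i2.2 i3.2),
           st3.2 ++ [((pvLoop s1.toList s2.toList s3.toList [(i1.1, i2.1, i3.1)] st3.1
             (pvCellInb s1.toList s2.toList s3.toList i1.1 i2.1 i3.1 i1.2 i2.2 i3.2)).get?
               (i1.1, i2.1, i3.1)).getD 0]))
        (m, acc)).2 =
        acc ++ (List.range (s3.toList.length + 1)).map
          (fun z => pvScs s1.toList s2.toList s3.toList i1.1 i2.1 z) ∧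
      pvSound s1.toList s2.toList s3.toList
      ((List.range (s3.toList.length + 1)).attach.foldl
        (fun (st3 : PySem.Dict (Nat × Nat × Nat) Int × List Int) (i3 : {x // x ∈ List.range (s3.toList.length + 1)}) =>
          (pvLoop s1.toList s2.toList s3.toList [(i1.1, i2.1, i3.1)] st3.1
             (pvCellInb s1.toList s2.toList s3.toList i1.1 i2.1 i3.1 i1.2 i2.2 i3.2),
           st3.2 ++ [((pvLoop s1.toList s2.toList s3.toList [(i1.1, i2.1, i3.1)] st3.1
             (pvCellInb s1.toList s2.toList s3.toList i1.1 i2.1 i3.1 i1.2 i2.2 i3.2)).get?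
               (i1.1, i2.1, i3.1)).getD 0]))
        (m, acc)).1 := by
    intro i1 i2 m acc hm
    have ht := pvFoldl_thread (pvSound s1.toList s2.toList s3.toList)
      ((List.range (s3.toList.length + 1)).attach)
      (fun (st3 : PySem.Dict (Nat × Nat × Nat) Int × List Int) (i3 : {x // x ∈ List.range (s3.toList.length + 1)}) =>
          (pvLoop s1.toList s2.toList s3.toList [(i1.1, i2.1, i3.1)] st3.1
             (pvCellInb s1.toList s2.toList s3.toList i1.1 i2.1 i3.1 i1.2 i2.2 i3.2),
           st3.2 ++ [((pvLoop s1.toList s2.toList s3.toList [(i1.1, i2.1, i3.1)] st3.1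
             (pvCellInb s1.toList s2.toList s3.toList i1.1 i2.1 i3.1 i1.2 i2.2 i3.2)).get?
               (i1.1, i2.1, i3.1)).getD 0]))
      (fun i3 => pvScs s1.toList s2.toList s3.toList i1.1 i2.1 i3.1)
      (by
        intro m acc x hx hm
        have hspec := pvSolve_spec s1.toList s2.toList s3.toList (i1.1, i2.1, x.1)
          (pvCellInb s1.toList s2.toList s3.toList i1.1 i2.1 x.1 i1.2 i2.2 x.2) m hm
        exact ⟨by dsimp only; rw [hspec.2], hspec.1⟩)
      m acc hm
    refine ⟨?_, ht.2⟩
    rw [ht.1]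
    congr 1
    exact @List.attach_map_val _ _ (List.range (s3.toList.length + 1))
      (fun z => pvScs s1.toList s2.toList s3.toList i1.1 i2.1 z)
  have h2 : ∀ (i1 : {x // x ∈ List.range (s1.toList.length + 1)})
      (m : PySem.Dict (Nat × Nat × Nat) Int) (acc : List (List Int)),
      pvSound s1.toList s2.toList s3.toList m →
      ((List.range (s2.toList.length + 1)).attach.foldl
        (fun (st2 : PySem.Dict (Nat × Nat × Nat) Int × List (List Int)) (i2 : {x // x ∈ List.range (s2.toList.length + 1)}) =>
          (((List.range (s3.toList.length + 1)).attach.foldl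
            (fun (st3 : PySem.Dict (Nat × Nat × Nat) Int × List Int) (i3 : {x // x ∈ List.range (s3.toList.length + 1)}) =>
              (pvLoop s1.toList s2.toList s3.toList [(i1.1, i2.1, i3.1)] st3.1
                 (pvCellInb s1.toList s2.toList s3.toList i1.1 i2.1 i3.1 i1.2 i2.2 i3.2),
               st3.2 ++ [((pvLoop s1.toList s2.toList s3.toList [(i1.1, i2.1, i3.1)] st3.1
                 (pvCellInb s1.toList s2.toList s3.toList i1.1 i2.1 i3.1 i1.2 i2.2 i3.2)).get?
                   (i1.1, i2.1, i3.1)).getD 0]))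
            (st2.1, ([] : List Int))).1,
           st2.2 ++ [((List.range (s3.toList.length + 1)).attach.foldl
            (fun (st3 : PySem.Dict (Nat × Nat × Nat) Int × List Int) (i3 : {x // x ∈ List.range (s3.toList.length + 1)}) =>
              (pvLoop s1.toList s2.toList s3.toList [(i1.1, i2.1, i3.1)] st3.1
                 (pvCellInb s1.toList s2.toList s3.toList i1.1 i2.1 i3.1 i1.2 i2.2 i3.2),
               st3.2 ++ [((pvLoop s1.toList s2.toList s3.toList [(i1.1, i2.1, i3.1)] st3.1
                 (pvCellInb s1.toList s2.toList s3.toList i1.1 i2.1 i3.1 i1.2 i2.2 i3.2)).get?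
                   (i1.1, i2.1, i3.1)).getD 0]))
            (st2.1, ([] : List Int))).2]))
        (m, acc)).2 =
        acc ++ (List.range (s2.toList.length + 1)).map
          (fun y => (List.range (s3.toList.length + 1)).map
            (fun z => pvScs s1.toList s2.toList s3.toList i1.1 y z)) ∧
      pvSound s1.toList s2.toList s3.toList
      ((List.range (s2.toList.length + 1)).attach.foldl
        (fun (st2 : PySem.Dict (Nat × Nat × Nat) Int × List (List Int)) (i2 : {x // x ∈ List.range (s2.toList.length + 1)}) =>
          (((List.range (s3.toList.length + 1)).attach.foldl
            (fun (st3 : PySem.Dict (Nat × Nat × Nat) Int × List Int) (i3 : {x // x ∈ List.range (s3.toList.length + 1)}) =>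
              (pvLoop s1.toList s2.toList s3.toList [(i1.1, i2.1, i3.1)] st3.1
                 (pvCellInb s1.toList s2.toList s3.toList i1.1 i2.1 i3.1 i1.2 i2.2 i3.2),
               st3.2 ++ [((pvLoop s1.toList s2.toList s3.toList [(i1.1, i2.1, i3.1)] st3.1
                 (pvCellInb s1.toList s2.toList s3.toList i1.1 i2.1 i3.1 i1.2 i2.2 i3.2)).get?
                   (i1.1, i2.1, i3.1)).getD 0]))
            (st2.1, ([] : List Int))).1,
           st2.2 ++ [((List.range (s3.toList.length + 1)).attach.foldl
            (fun (st3 : PySem.Dict (Nat × Nat × Nat) Int × List Int) (i3 : {x // x ∈ List.range (s3.toList.length + 1)}) =>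
              (pvLoop s1.toList s2.toList s3.toList [(i1.1, i2.1, i3.1)] st3.1
                 (pvCellInb s1.toList s2.toList s3.toList i1.1 i2.1 i3.1 i1.2 i2.2 i3.2),
               st3.2 ++ [((pvLoop s1.toList s2.toList s3.toList [(i1.1, i2.1, i3.1)] st3.1
                 (pvCellInb s1.toList s2.toList s3.toList i1.1 i2.1 i3.1 i1.2 i2.2 i3.2)).get?
                   (i1.1, i2.1, i3.1)).getD 0]))
            (st2.1, ([] : List Int))).2]))
        (m, acc)).1 := by
    intro i1 m acc hm
    have ht := pvFoldl_thread (pvSound s1.toList s2.toList s3.toList)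
      ((List.range (s2.toList.length + 1)).attach)
      (fun (st2 : PySem.Dict (Nat × Nat × Nat) Int × List (List Int)) (i2 : {x // x ∈ List.range (s2.toList.length + 1)}) =>
          (((List.range (s3.toList.length + 1)).attach.foldl
            (fun (st3 : PySem.Dict (Nat × Nat × Nat) Int × List Int) (i3 : {x // x ∈ List.range (s3.toList.length + 1)}) =>
              (pvLoop s1.toList s2.toList s3.toList [(i1.1, i2.1, i3.1)] st3.1
                 (pvCellInb s1.toList s2.toList s3.toList i1.1 i2.1 i3.1 i1.2 i2.2 i3.2),
               st3.2 ++ [((pvLoop s1.toList s2.toList s3.toList [(i1.1, i2.1, i3.1)] st3.1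
                 (pvCellInb s1.toList s2.toList s3.toList i1.1 i2.1 i3.1 i1.2 i2.2 i3.2)).get?
                   (i1.1, i2.1, i3.1)).getD 0]))
            (st2.1, ([] : List Int))).1,
           st2.2 ++ [((List.range (s3.toList.length + 1)).attach.foldl
            (fun (st3 : PySem.Dict (Nat × Nat × Nat) Int × List Int) (i3 : {x // x ∈ List.range (s3.toList.length + 1)}) =>
              (pvLoop s1.toList s2.toList s3.toList [(i1.1, i2.1, i3.1)] st3.1
                 (pvCellInb s1.toList s2.toList s3.toList i1.1 i2.1 i3.1 i1.2 i2.2 i3.2),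
               st3.2 ++ [((pvLoop s1.toList s2.toList s3.toList [(i1.1, i2.1, i3.1)] st3.1
                 (pvCellInb s1.toList s2.toList s3.toList i1.1 i2.1 i3.1 i1.2 i2.2 i3.2)).get?
                   (i1.1, i2.1, i3.1)).getD 0]))
            (st2.1, ([] : List Int))).2]))
      (fun (i2 : {x // x ∈ List.range (s2.toList.length + 1)}) =>
        (List.range (s3.toList.length + 1)).map
          (fun z => pvScs s1.toList s2.toList s3.toList i1.1 i2.1 z))
      (by
        intro m2 acc2 x hx hm2
        have hr := h3 i1 x m2 ([] : List Int) hm2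
        exact ⟨by dsimp only; rw [hr.1, List.nil_append], hr.2⟩)
      m acc hm
    refine ⟨?_, ht.2⟩
    rw [ht.1]
    congr 1
    exact @List.attach_map_val _ _ (List.range (s2.toList.length + 1))
      (fun y => (List.range (s3.toList.length + 1)).map
        (fun z => pvScs s1.toList s2.toList s3.toList i1.1 y z))
  have hsE : pvSound s1.toList s2.toList s3.toList (PySem.Dict.empty : PySem.Dict (Nat × Nat × Nat) Int) := by
    intro q v hv
    rw [PySem.Dict.get?_empty] at hv
    exact absurd hv (by simp)
  have h1 := pvFoldl_thread (pvSound s1.toList s2.toList s3.toList)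
    ((List.range (s1.toList.length + 1)).attach)
    (fun (st : PySem.Dict (Nat × Nat × Nat) Int × List (List (List Int))) i1 =>
      (((List.range (s2.toList.length + 1)).attach.foldl
        (fun (st2 : PySem.Dict (Nat × Nat × Nat) Int × List (List Int)) (i2 : {x // x ∈ List.range (s2.toList.length + 1)}) =>
          (((List.range (s3.toList.length + 1)).attach.foldl
            (fun (st3 : PySem.Dict (Nat × Nat × Nat) Int × List Int) (i3 : {x // x ∈ List.range (s3.toList.length + 1)}) =>
              (pvLoop s1.toList s2.toList s3.toList [(i1.1, i2.1, i3.1)] st3.1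
                 (pvCellInb s1.toList s2.toList s3.toList i1.1 i2.1 i3.1 i1.2 i2.2 i3.2),
               st3.2 ++ [((pvLoop s1.toList s2.toList s3.toList [(i1.1, i2.1, i3.1)] st3.1
                 (pvCellInb s1.toList s2.toList s3.toList i1.1 i2.1 i3.1 i1.2 i2.2 i3.2)).get?
                   (i1.1, i2.1, i3.1)).getD 0]))
            (st2.1, ([] : List Int))).1,
           st2.2 ++ [((List.range (s3.toList.length + 1)).attach.foldl
            (fun (st3 : PySem.Dict (Nat × Nat × Nat) Int × List Int) (i3 : {x // x ∈ List.range (s3.toList.length + 1)}) =>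
              (pvLoop s1.toList s2.toList s3.toList [(i1.1, i2.1, i3.1)] st3.1
                 (pvCellInb s1.toList s2.toList s3.toList i1.1 i2.1 i3.1 i1.2 i2.2 i3.2),
               st3.2 ++ [((pvLoop s1.toList s2.toList s3.toList [(i1.1, i2.1, i3.1)] st3.1
                 (pvCellInb s1.toList s2.toList s3.toList i1.1 i2.1 i3.1 i1.2 i2.2 i3.2)).get?
                   (i1.1, i2.1, i3.1)).getD 0]))
            (st2.1, ([] : List Int))).2]))
        (st.1, ([] : List (List Int)))).1,
       st.2 ++ [((List.range (s2.toList.length + 1)).attach.foldl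
        (fun (st2 : PySem.Dict (Nat × Nat × Nat) Int × List (List Int)) (i2 : {x // x ∈ List.range (s2.toList.length + 1)}) =>
          (((List.range (s3.toList.length + 1)).attach.foldl
            (fun (st3 : PySem.Dict (Nat × Nat × Nat) Int × List Int) (i3 : {x // x ∈ List.range (s3.toList.length + 1)}) =>
              (pvLoop s1.toList s2.toList s3.toList [(i1.1, i2.1, i3.1)] st3.1
                 (pvCellInb s1.toList s2.toList s3.toList i1.1 i2.1 i3.1 i1.2 i2.2 i3.2),
               st3.2 ++ [((pvLoop s1.toList s2.toList s3.toList [(i1.1, i2.1, i3.1)] st3.1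
                 (pvCellInb s1.toList s2.toList s3.toList i1.1 i2.1 i3.1 i1.2 i2.2 i3.2)).get?
                   (i1.1, i2.1, i3.1)).getD 0]))
            (st2.1, ([] : List Int))).1,
           st2.2 ++ [((List.range (s3.toList.length + 1)).attach.foldl
            (fun (st3 : PySem.Dict (Nat × Nat × Nat) Int × List Int) (i3 : {x // x ∈ List.range (s3.toList.length + 1)}) =>
              (pvLoop s1.toList s2.toList s3.toList [(i1.1, i2.1, i3.1)] st3.1
                 (pvCellInb s1.toList s2.toList s3.toList i1.1 i2.1 i3.1 i1.2 i2.2 i3.2),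
               st3.2 ++ [((pvLoop s1.toList s2.toList s3.toList [(i1.1, i2.1, i3.1)] st3.1
                 (pvCellInb s1.toList s2.toList s3.toList i1.1 i2.1 i3.1 i1.2 i2.2 i3.2)).get?
                   (i1.1, i2.1, i3.1)).getD 0]))
            (st2.1, ([] : List Int))).2]))
        (st.1, ([] : List (List Int)))).2]))
    (fun i1 => (List.range (s2.toList.length + 1)).map
      (fun y => (List.range (s3.toList.length + 1)).map
        (fun z => pvScs s1.toList s2.toList s3.toList i1.1 y z)))
    (by
      intro m acc x hx hm
      have hr := h2 x m ([] : List (List Int)) hm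
      exact ⟨by dsimp only; rw [hr.1, List.nil_append], hr.2⟩)
    (PySem.Dict.empty : PySem.Dict (Nat × Nat × Nat) Int)
    ([] : List (List (List Int))) hsE
  calc boundtable_scs3_alt s1 s2 s3
      = ([] : List (List (List Int))) ++ (List.range (s1.toList.length + 1)).attach.map
        (fun i1 => (List.range (s2.toList.length + 1)).map
          (fun y => (List.range (s3.toList.length + 1)).map
            (fun z => pvScs s1.toList s2.toList s3.toList i1.1 y z))) := h1.1
    _ = _ := by
        rw [List.nil_append]
        exact @List.attach_map_val _ _ (List.range (s1.toList.length + 1))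
          (fun x => (List.range (s2.toList.length + 1)).map
            (fun y => (List.range (s3.toList.length + 1)).map
              (fun z => pvScs s1.toList s2.toList s3.toList x y z)))

-- ===== VERDICT (by name: the statement is the Claim_ definition above) =====
theorem boundtable_scs3_spec : Claim_equal_boundtable_scs3 := by
  intro s1 s2 s3 _
  unfold Spec_boundtable_scs3
  rw [pvA_eq, pvB_eq]
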